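-- pv_equiv track=rewrite | github.com/ZNNNNZ/pratice_code | code31.py | min_huiwen
-- ===== SOURCE A (Python) =====
-- def min_huiwen(strings):
--     count=[0]*26
--     nums1=0
--     for i in strings:
--         num=ord(i)-97
--         count[num]+=1
--     for j in range(26):
--         if count[j]>0:
--             if count[j]%2==1:
--                 nums1+=1
--     if nums1>0:
--         return nums1
--     else:return 1
-- ===== SOURCE B (Python) =====
-- def min_huiwen(strings):
--     nums = [ord(i) - 97 for i in strings]
--     odd = 0
--     while nums:
--         head = nums[0]
--         rest = [v for v in nums if v != head]
--         if (len(nums) - len(rest)) % 2 == 1: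
--             odd += 1
--         nums = rest
--     return odd if odd > 0 else 1
-- ===== Notes on version B (the rewrite author's own statement) =====
-- stated objective: alternative
-- what changed: Replaces A's fixed 26-bucket counting array plus bucket scan with a distinct-value elimination loop: repeatedly take the first remaining character code, filter out all its occurrences, and count whether that group's size is odd; no counting array and no range(26) scan exist.
-- intended difference: On strings whose characters all have codes 71..122 but where some character c in codes 71..96 and the letter chr(ord(c)+26) both occur an odd number of times, A's negative-index wraparound (ord(c)-97 is negative) conflates c's count with that letter's and returns a too-small count, while B counts every distinct character separately and returns the intended number of odd-frequency characters. — e.g. on min_huiwen("Ga"): A returns 1, B returns 2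
import Mathlib
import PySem

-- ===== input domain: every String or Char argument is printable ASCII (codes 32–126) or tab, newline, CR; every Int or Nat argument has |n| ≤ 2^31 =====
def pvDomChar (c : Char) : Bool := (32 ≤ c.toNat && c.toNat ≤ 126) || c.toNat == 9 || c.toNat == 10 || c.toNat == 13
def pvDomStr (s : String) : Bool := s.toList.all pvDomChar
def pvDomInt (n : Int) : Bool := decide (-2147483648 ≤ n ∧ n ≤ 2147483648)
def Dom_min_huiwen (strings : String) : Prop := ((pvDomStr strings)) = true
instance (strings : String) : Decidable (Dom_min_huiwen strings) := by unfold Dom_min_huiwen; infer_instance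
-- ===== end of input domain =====

-- B replaces A's 26-slot counting array and bucket scan by a distinct-value
-- elimination loop (take first remaining code, filter out all its occurrences,
-- record the group's parity); same cost class, no counting array, no 26-scan.

-- ===== PORT A =====
def min_huiwen (strings : String) : Int :=
  -- count=[0]*26; for i in strings: count[ord(i)-97] += 1
  let count : List Int := strings.toList.foldl (fun count i =>
    let num : Int := (i.toNat : Int) - 97
    PySem.List.pySetD count num (PySem.List.pyGetD count num 0 + 1))
    (List.replicate 26 (0 : Int))
  -- for j in range(26): if count[j]>0: if count[j]%2==1: nums1+=1
  let nums1 : Int := (PySem.List.pyRange 0 26 1).foldl (fun nums1 j =>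
    if 0 < PySem.List.pyGetD count j 0 then
      if PySem.Int.mod (PySem.List.pyGetD count j 0) 2 = 1 then nums1 + 1 else nums1
    else nums1) 0
  if 0 < nums1 then nums1 else 1

-- ===== PORT B =====
-- while nums: head=nums[0]; rest=[v for v in nums if v != head];
--             if (len(nums)-len(rest)) % 2 == 1: odd += 1; nums = rest
def pvBLoop : List Int → Int → Int
  | [], odd => odd
  | head :: tail, odd =>
    let rest := (head :: tail).filter (fun v => !(v == head))
    pvBLoop rest
      (if PySem.Int.mod (((head :: tail).length : Int) - (rest.length : Int)) 2 = 1
       then odd + 1 else odd)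
termination_by l _ => l.length
decreasing_by
  simp only [List.filter_cons, beq_self_eq_true, Bool.not_true, List.length_cons]
  exact Nat.lt_succ_of_le (List.length_filter_le _ _)

def min_huiwen_alt (strings : String) : Int :=
  -- nums = [ord(i) - 97 for i in strings]
  let nums : List Int := strings.toList.map (fun i => (i.toNat : Int) - 97)
  let odd : Int := pvBLoop nums 0
  if 0 < odd then odd else 1

-- ===== PRECONDITION & SPEC =====
-- Pre_ excludes exactly the strings containing a character of code < 71 or > 122,
-- on which A's count[ord(i)-97] raises IndexError (codes 71..96 give valid
-- negative indices and do not raise).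
def Pre_min_huiwen (strings : String) : Prop :=
  (strings.toList.all (fun c => 71 ≤ c.toNat && c.toNat ≤ 122)) = true
instance (strings : String) : Decidable (Pre_min_huiwen strings) := by
  unfold Pre_min_huiwen; infer_instance
def pvWitness_min_huiwen : String := "abcba"

-- On strings whose characters all have codes 71..122 but where some character c
-- of code 71..96 and the letter of code (ord(c)+26) both occur an odd number of
-- times, A's negative-index wraparound conflates c's count with that letter's
-- and returns a too-small count, while B counts every distinct character
-- separately and returns the intended number of odd-frequency characters.
def D_min_huiwen (strings : String) : Prop :=
  ∃ k ∈ Finset.range 26,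
    (strings.toList.countP (fun c => c.toNat == k + 71)) % 2 = 1 ∧
    (strings.toList.countP (fun c => c.toNat == k + 97)) % 2 = 1
instance (strings : String) : Decidable (D_min_huiwen strings) := by
  unfold D_min_huiwen; infer_instance

def Spec_min_huiwen (strings : String) (out : Int) : Prop :=
  ¬ D_min_huiwen strings → out = min_huiwen_alt strings
instance (strings : String) (out : Int) : Decidable (Spec_min_huiwen strings out) := by
  unfold Spec_min_huiwen; infer_instance

def pvDiffWitness_min_huiwen : String := "Ga"
def pvDiffWitnessOut_min_huiwen : Int × Int := (1, 2)

-- ===== CLAIM (what is proved, stated in full; the proofs are below) =====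
def Claim_unchanged_min_huiwen : Prop := ∀ (strings : String), Dom_min_huiwen strings → Pre_min_huiwen strings → Spec_min_huiwen strings (min_huiwen strings)
def Claim_changed_min_huiwen : Prop := Dom_min_huiwen (pvDiffWitness_min_huiwen) ∧ Pre_min_huiwen (pvDiffWitness_min_huiwen) ∧ D_min_huiwen (pvDiffWitness_min_huiwen) ∧ min_huiwen (pvDiffWitness_min_huiwen) = pvDiffWitnessOut_min_huiwen.1 ∧ min_huiwen_alt (pvDiffWitness_min_huiwen) = pvDiffWitnessOut_min_huiwen.2 ∧ pvDiffWitnessOut_min_huiwen.1 ≠ pvDiffWitnessOut_min_huiwen.2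
def Claim_exact_min_huiwen : Prop := ∀ (strings : String), Dom_min_huiwen strings → Pre_min_huiwen strings → D_min_huiwen strings → min_huiwen strings ≠ min_huiwen_alt strings

-- ===== LEMMAS AND PROOFS =====

-- number of occurrences of the character of code m
def pvCnt (l : List Char) (m : Nat) : Nat := l.countP (fun c => c.toNat == m)

-- Effective Nat index of Python index i on a length-26 list (negative i wraps).
def pvEIdx (i : Int) : Nat := (if i < 0 then i + 26 else i).toNat

lemma pvEIdx_lt (i : Int) (h1 : -26 ≤ i) (h2 : i < 26) : pvEIdx i < 26 := by
  unfold pvEIdx; split <;> omega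

lemma pyIdx_26 (i : Int) (h1 : -26 ≤ i) (h2 : i < 26) :
    PySem.List.pyIdx? 26 i = some (pvEIdx i) := by
  unfold PySem.List.pyIdx? pvEIdx
  by_cases h0 : 0 ≤ i
  · rw [if_pos h0, if_pos (by exact_mod_cast h2), if_neg (by omega : ¬ i < 0)]
  · rw [if_neg h0, if_pos (by exact_mod_cast h1), if_pos (by omega : i < 0)]
    congr 1
    omega

lemma pyGetD_26 (xs : List Int) (hxs : xs.length = 26) (i : Int) (d : Int)
    (h1 : -26 ≤ i) (h2 : i < 26) :
    PySem.List.pyGetD xs i d = xs.getD (pvEIdx i) d := by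
  unfold PySem.List.pyGetD PySem.List.pyGet?
  rw [hxs, pyIdx_26 i h1 h2]
  simp [List.getD_eq_getElem?_getD]

lemma pySetD_26 (xs : List Int) (hxs : xs.length = 26) (i : Int) (v : Int)
    (h1 : -26 ≤ i) (h2 : i < 26) :
    PySem.List.pySetD xs i v = xs.set (pvEIdx i) v := by
  unfold PySem.List.pySetD PySem.List.pySet?
  rw [hxs, pyIdx_26 i h1 h2]
  rfl

-- for an admitted character, its wrapped slot is j iff its code is j+71 or j+97
lemma pvEIdx_char (c : Char) (j : Nat) (hj : j < 26)
    (hc1 : 71 ≤ c.toNat) (hc2 : c.toNat ≤ 122) :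
    pvEIdx ((c.toNat : Int) - 97) = j ↔ (c.toNat = j + 71 ∨ c.toNat = j + 97) := by
  unfold pvEIdx; split <;> omega

-- A's counting loop: slot j holds the conflated count of codes j+71 and j+97
lemma pvALoop (l : List Char) (count : List Int)
    (hl : ∀ c ∈ l, 71 ≤ c.toNat ∧ c.toNat ≤ 122) (hlen : count.length = 26) :
    (l.foldl (fun count i =>
      PySem.List.pySetD count ((i.toNat : Int) - 97)
        (PySem.List.pyGetD count ((i.toNat : Int) - 97) 0 + 1)) count).length = 26 ∧
    ∀ j : Nat, j < 26 →
      (l.foldl (fun count i =>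
        PySem.List.pySetD count ((i.toNat : Int) - 97)
          (PySem.List.pyGetD count ((i.toNat : Int) - 97) 0 + 1)) count).getD j 0
      = count.getD j 0 + (pvCnt l (j + 71) : Int) + (pvCnt l (j + 97) : Int) := by
  induction l generalizing count with
  | nil => exact ⟨hlen, fun j hj => by simp [pvCnt]⟩
  | cons c l ih =>
    have hc := hl c List.mem_cons_self
    have hb1 : -26 ≤ (c.toNat : Int) - 97 := by omega
    have hb2 : (c.toNat : Int) - 97 < 26 := by omega
    simp only [List.foldl_cons]
    rw [pyGetD_26 count hlen _ 0 hb1 hb2, pySetD_26 count hlen _ _ hb1 hb2]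
    set e : Nat := pvEIdx ((c.toNat : Int) - 97) with he
    have he26 : e < 26 := pvEIdx_lt _ hb1 hb2
    have hlen' : (count.set e (count.getD e 0 + 1)).length = 26 := by simp [hlen]
    obtain ⟨hL, hG⟩ := ih (count.set e (count.getD e 0 + 1))
      (fun x hx => hl x (List.mem_cons_of_mem _ hx)) hlen'
    refine ⟨hL, fun j hj => ?_⟩
    rw [hG j hj]
    have hset : (count.set e (count.getD e 0 + 1)).getD j 0
        = count.getD j 0 + (if e = j then 1 else 0) := by
      by_cases hej : e = j
      · subst hej
        simp [List.getD_eq_getElem?_getD,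
          List.getElem?_set_self (by omega : e < count.length)]
      · rw [if_neg hej, List.getD_eq_getElem?_getD, List.getElem?_set_ne hej,
          ← List.getD_eq_getElem?_getD]
        ring
    have hcnt71 : (pvCnt (c :: l) (j + 71) : Int)
        = (pvCnt l (j + 71) : Int) + (if c.toNat = j + 71 then 1 else 0) := by
      simp only [pvCnt, List.countP_cons]
      by_cases h : c.toNat = j + 71 <;> simp [h]
    have hcnt97 : (pvCnt (c :: l) (j + 97) : Int)
        = (pvCnt l (j + 97) : Int) + (if c.toNat = j + 97 then 1 else 0) := by
      simp only [pvCnt, List.countP_cons]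
      by_cases h : c.toNat = j + 97 <;> simp [h]
    rw [hset, hcnt71, hcnt97]
    have hiff := pvEIdx_char c j hj hc.1 hc.2
    rw [← he] at hiff
    by_cases hej : e = j
    · rcases hiff.mp hej with h71 | h97
      · rw [if_pos hej, if_pos h71, if_neg (by omega)]; ring
      · rw [if_pos hej, if_neg (by omega), if_pos h97]; ring
    · rw [if_neg hej, if_neg (fun h => hej (hiff.mpr (Or.inl h))),
        if_neg (fun h => hej (hiff.mpr (Or.inr h)))]
      ring

-- A's second loop computes the sum of slot parities when all counts are nonnegative
lemma pvScan (count : List Int) (hnn : ∀ j : Nat, 0 ≤ count.getD j 0) :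
    ((PySem.List.pyRange 0 26 1).foldl (fun nums1 j =>
      if 0 < PySem.List.pyGetD count j 0 then
        if PySem.Int.mod (PySem.List.pyGetD count j 0) 2 = 1 then nums1 + 1 else nums1
      else nums1) 0)
    = ∑ j ∈ Finset.range 26, count.getD j 0 % 2 := by
  have hr : PySem.List.pyRange 0 26 1 = (List.range 26).map (fun k : Nat => (k : Int)) := by
    decide
  rw [hr, List.foldl_map]
  have hbody : (fun (nums1 : Int) (k : Nat) =>
      if 0 < PySem.List.pyGetD count (k : Int) 0 then
        if PySem.Int.mod (PySem.List.pyGetD count (k : Int) 0) 2 = 1 then nums1 + 1 else nums1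
      else nums1)
      = fun (nums1 : Int) (k : Nat) => nums1 + count.getD k 0 % 2 := by
    funext a k
    rw [PySem.List.pyGetD_natCast, PySem.Int.mod_eq_emod_of_pos (by norm_num)]
    have := hnn k
    split_ifs <;> omega
  rw [hbody, PySem.List.foldl_add]
  show (0 : Int) + _ = _
  rw [zero_add]
  rfl

-- A's value as a parity sum of the per-slot (conflated) counts
lemma pvA_val (s : String) (hpre : ∀ c ∈ s.toList, 71 ≤ c.toNat ∧ c.toNat ≤ 122) :
    min_huiwen s =
      (if 0 < ∑ j ∈ Finset.range 26,
          ((pvCnt s.toList (j + 71) : Int) + (pvCnt s.toList (j + 97) : Int)) % 2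
       then ∑ j ∈ Finset.range 26,
          ((pvCnt s.toList (j + 71) : Int) + (pvCnt s.toList (j + 97) : Int)) % 2
       else 1) := by
  simp only [min_huiwen]
  obtain ⟨hL, hG⟩ := pvALoop s.toList (List.replicate 26 (0 : Int)) hpre (by simp)
  have hz : ∀ j : Nat, (List.replicate 26 (0 : Int)).getD j 0 = 0 := by
    intro j
    rw [List.getD_eq_getElem?_getD, List.getElem?_replicate]
    split <;> rfl
  have hval : ∀ j : Nat, j < 26 →
      (s.toList.foldl (fun count i =>
        PySem.List.pySetD count ((i.toNat : Int) - 97)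
          (PySem.List.pyGetD count ((i.toNat : Int) - 97) 0 + 1))
        (List.replicate 26 (0 : Int))).getD j 0
      = (pvCnt s.toList (j + 71) : Int) + (pvCnt s.toList (j + 97) : Int) := by
    intro j hj
    rw [hG j hj, hz j]
    ring
  have hnn : ∀ j : Nat, 0 ≤ (s.toList.foldl (fun count i =>
      PySem.List.pySetD count ((i.toNat : Int) - 97)
        (PySem.List.pyGetD count ((i.toNat : Int) - 97) 0 + 1))
      (List.replicate 26 (0 : Int))).getD j 0 := by
    intro j
    by_cases hj : j < 26
    · rw [hval j hj]
      exact add_nonneg (Int.natCast_nonneg _) (Int.natCast_nonneg _)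
    · rw [List.getD_eq_getElem?_getD, List.getElem?_eq_none (by omega)]; simp
  rw [pvScan _ hnn]
  rw [Finset.sum_congr rfl (fun j hj => by rw [hval j (Finset.mem_range.mp hj)])]

-- B's elimination loop computes the sum over [-26, 26) of count parities
lemma pvBLoop_sum : ∀ (n : Nat) (xs : List Int), xs.length = n →
    (∀ t ∈ xs, -26 ≤ t ∧ t < 26) → ∀ odd : Int,
    pvBLoop xs odd = odd + ∑ t ∈ Finset.Icc (-26 : Int) 25, ((xs.count t : Int) % 2) := by
  intro n
  induction n using Nat.strong_induction_on with
  | _ n ih =>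
    intro xs hn hmem odd
    match xs, hn with
    | [], hn =>
      simp [pvBLoop]
    | h :: t, hn =>
      rw [pvBLoop]
      have hrest : ((h :: t).filter (fun v => !(v == h))) = t.filter (fun v => !(v == h)) := by
        simp
      rw [hrest]
      have hrlt : (t.filter (fun v => !(v == h))).length < n := by
        have h1 := List.length_filter_le (fun v => !(v == h)) t
        have h2 : (h :: t).length = n := hn
        simp only [List.length_cons] at h2
        omega
      have hrmem : ∀ u ∈ t.filter (fun v => !(v == h)), -26 ≤ u ∧ u < 26 := fun u hu =>
        hmem u (List.mem_cons_of_mem _ (List.mem_of_mem_filter hu))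
      rw [ih _ hrlt _ rfl hrmem]
      -- the removed group size is the count of h
      have hcount : ((h :: t).length : Int) - ((t.filter (fun v => !(v == h))).length : Int)
          = ((h :: t).count h : Int) := by
        have h1 : (h :: t).countP (fun v => (v == h)) + (h :: t).countP (fun v => !(v == h))
            = (h :: t).length := by
          rw [Nat.add_comm]
          rw [List.length_eq_countP_add_countP (fun v => !(v == h))]
          congr 1
          exact List.countP_congr (fun a _ => by simp)
        have h2 : ((h :: t).filter (fun v => !(v == h))).length
            = (h :: t).countP (fun v => !(v == h)) := by
          rw [← List.countP_eq_length_filter]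
        rw [hrest] at h2
        have h3 : (h :: t).count h = (h :: t).countP (fun v => (v == h)) := rfl
        omega
      -- counts in the filtered remainder: 0 at h, unchanged elsewhere
      have hch : ((t.filter (fun v => !(v == h))).count h : Int) = 0 := by
        norm_cast
        rw [List.count_eq_zero]
        intro hh
        have := List.of_mem_filter hh
        simp at this
      have hcother : ∀ u : Int, u ≠ h →
          ((t.filter (fun v => !(v == h))).count u : Int) = ((h :: t).count u : Int) := by
        intro u hu
        norm_cast
        rw [← hrest]
        apply List.count_filter
        simp [hu]
      have hhin : h ∈ Finset.Icc (-26 : Int) 25 := by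
        have := hmem h List.mem_cons_self
        simp only [Finset.mem_Icc]
        omega
      have hsum : ∑ u ∈ Finset.Icc (-26 : Int) 25, (((h :: t).count u : Int) % 2)
          = (((h :: t).count h : Int) % 2)
            + ∑ u ∈ Finset.Icc (-26 : Int) 25, (((t.filter (fun v => !(v == h))).count u : Int) % 2) := by
        rw [← Finset.add_sum_erase _ _ hhin,
          ← Finset.add_sum_erase _ (fun u => (((t.filter (fun v => !(v == h))).count u : Int) % 2)) hhin]
        rw [hch]
        have heq : ∑ u ∈ (Finset.Icc (-26 : Int) 25).erase h,
            (((t.filter (fun v => !(v == h))).count u : Int) % 2)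
            = ∑ u ∈ (Finset.Icc (-26 : Int) 25).erase h, (((h :: t).count u : Int) % 2) := by
          refine Finset.sum_congr rfl (fun u hu => ?_)
          rw [hcother u (Finset.mem_erase.mp hu).1]
        rw [heq]
        norm_num
      rw [hsum, hcount]
      have hpar : ((h :: t).count h : Int) % 2 = 0 ∨ ((h :: t).count h : Int) % 2 = 1 := by
        omega
      rw [PySem.Int.mod_eq_emod_of_pos (by norm_num)]
      rcases hpar with hp | hp <;> rw [hp]
      · norm_num
      · norm_num
        ring

-- splitting the sum over [-26, 26) into negative and nonnegative halves
lemma pvIccSplit (f : Int → Int) :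
    ∑ t ∈ Finset.Icc (-26 : Int) 25, f t
      = ∑ j ∈ Finset.range 26, (f ((j : Int) - 26) + f (j : Int)) := by
  have hset : Finset.Icc (-26 : Int) 25
      = ((Finset.range 26).image (fun j : Nat => (j : Int) - 26))
        ∪ ((Finset.range 26).image (fun j : Nat => (j : Int))) := by
    ext t
    simp only [Finset.mem_Icc, Finset.mem_union, Finset.mem_image, Finset.mem_range]
    constructor
    · intro ht
      by_cases h0 : t < 0
      · exact Or.inl ⟨(t + 26).toNat, by omega, by omega⟩
      · exact Or.inr ⟨t.toNat, by omega, by omega⟩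
    · rintro (⟨j, hj, rfl⟩ | ⟨j, hj, rfl⟩) <;> omega
  have hdisj : Disjoint ((Finset.range 26).image (fun j : Nat => (j : Int) - 26))
      ((Finset.range 26).image (fun j : Nat => (j : Int))) := by
    rw [Finset.disjoint_left]
    intro a ha hb
    simp only [Finset.mem_image, Finset.mem_range] at ha hb
    obtain ⟨j, _, rfl⟩ := ha
    obtain ⟨k, _, hk⟩ := hb
    omega
  rw [hset, Finset.sum_union hdisj,
    Finset.sum_image (fun a _ b _ h => by omega),
    Finset.sum_image (fun a _ b _ h => by omega),
    ← Finset.sum_add_distrib]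

-- counts on the mapped code list are character counts
lemma pvCount_map (l : List Char) (t : Int) (m : Nat)
    (h : ∀ c : Char, (((c.toNat : Int) - 97) = t) ↔ (c.toNat = m)) :
    ((l.map (fun c => (c.toNat : Int) - 97)).count t : Int) = (pvCnt l m : Int) := by
  norm_cast
  rw [List.count_eq_countP, List.countP_map, pvCnt]
  refine List.countP_congr (fun c _ => ?_)
  simp only [Function.comp, beq_iff_eq]
  rw [Int.subNatNat_eq_coe]
  push_cast
  exact h c

-- one-step unfoldings of B's elimination loop (for literal evaluation)
lemma pvBLoop_nil (odd : Int) : pvBLoop [] odd = odd := by rw [pvBLoop]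

lemma pvBLoop_cons (a : Int) (t : List Int) (odd : Int) :
    pvBLoop (a :: t) odd = pvBLoop (t.filter (fun v => !(v == a)))
      (if PySem.Int.mod (((a :: t).length : Int) - ((t.filter (fun v => !(v == a))).length : Int)) 2 = 1
       then odd + 1 else odd) := by
  rw [pvBLoop]
  simp

-- B's value as a parity sum of the per-character counts
lemma pvB_val (s : String) (hpre : ∀ c ∈ s.toList, 71 ≤ c.toNat ∧ c.toNat ≤ 122) :
    min_huiwen_alt s =
      (if 0 < ∑ j ∈ Finset.range 26,
          ((pvCnt s.toList (j + 71) : Int) % 2 + (pvCnt s.toList (j + 97) : Int) % 2)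
       then ∑ j ∈ Finset.range 26,
          ((pvCnt s.toList (j + 71) : Int) % 2 + (pvCnt s.toList (j + 97) : Int) % 2)
       else 1) := by
  simp only [min_huiwen_alt]
  have hmem : ∀ u ∈ s.toList.map (fun c => (c.toNat : Int) - 97), -26 ≤ u ∧ u < 26 := by
    intro u hu
    obtain ⟨c, hc, rfl⟩ := List.mem_map.mp hu
    have := hpre c hc
    omega
  rw [pvBLoop_sum _ _ rfl hmem 0, zero_add,
    pvIccSplit (fun t => (((s.toList.map (fun c => (c.toNat : Int) - 97)).count t : Int) % 2))]
  have hbody : ∀ j ∈ Finset.range 26,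
      (((s.toList.map (fun c => (c.toNat : Int) - 97)).count ((j : Int) - 26) : Int) % 2
        + ((s.toList.map (fun c => (c.toNat : Int) - 97)).count (j : Int) : Int) % 2)
      = ((pvCnt s.toList (j + 71) : Int) % 2 + (pvCnt s.toList (j + 97) : Int) % 2) := by
    intro j hj
    rw [pvCount_map s.toList ((j : Int) - 26) (j + 71) (fun c => by omega),
      pvCount_map s.toList (j : Int) (j + 97) (fun c => by omega)]
  rw [Finset.sum_congr rfl hbody]

-- the two parity sums: B's = A's + 2·(number of conflated odd pairs)
lemma pvTermLe (x y : Int) : (x + y) % 2 ≤ x % 2 + y % 2 := by omega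

lemma pvPre_chars (s : String) (hpre : Pre_min_huiwen s) :
    ∀ c ∈ s.toList, 71 ≤ c.toNat ∧ c.toNat ≤ 122 := by
  intro c hc
  have := (List.all_eq_true.mp hpre) c hc
  simp only [Bool.and_eq_true, decide_eq_true_eq] at this
  exact this

-- ===== VERDICT (by name: the statement is the Claim_ definition above) =====
theorem min_huiwen_spec : Claim_unchanged_min_huiwen := by
  intro s _ hpre hnd
  have hchars := pvPre_chars s hpre
  rw [pvA_val s hchars, pvB_val s hchars]
  have hterm : ∀ j ∈ Finset.range 26,
      ((pvCnt s.toList (j + 71) : Int) + (pvCnt s.toList (j + 97) : Int)) % 2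
      = ((pvCnt s.toList (j + 71) : Int) % 2 + (pvCnt s.toList (j + 97) : Int) % 2) := by
    intro j hj
    have hnotboth : ¬ ((pvCnt s.toList (j + 71)) % 2 = 1 ∧ (pvCnt s.toList (j + 97)) % 2 = 1) := by
      intro hb
      exact hnd ⟨j, hj, hb.1, hb.2⟩
    have h1 : (0 : Int) ≤ (pvCnt s.toList (j + 71) : Int) := Int.natCast_nonneg _
    have h2 : (0 : Int) ≤ (pvCnt s.toList (j + 97) : Int) := Int.natCast_nonneg _
    omega
  rw [Finset.sum_congr rfl hterm]

theorem min_huiwen_changed : Claim_changed_min_huiwen := by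
  unfold Claim_changed_min_huiwen
  refine ⟨by decide, by decide, by decide, by decide, ?_, by decide⟩
  show min_huiwen_alt "Ga" = 2
  simp only [min_huiwen_alt]
  rw [show "Ga".toList.map (fun i => ((i.toNat : Int) - 97)) = [-26, 0] from by decide]
  rw [pvBLoop_cons]
  norm_num [List.filter_cons, List.filter_nil, PySem.Int.mod, Int.fmod]
  rw [pvBLoop_cons]
  norm_num [List.filter_cons, List.filter_nil, PySem.Int.mod, Int.fmod]
  rw [pvBLoop_nil]
  norm_num

theorem min_huiwen_tight : Claim_exact_min_huiwen := by
  intro s _ hpre hd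
  obtain ⟨k, hk, hk71, hk97⟩ := hd
  have hchars := pvPre_chars s hpre
  rw [pvA_val s hchars, pvB_val s hchars]
  have hk71' : (pvCnt s.toList (k + 71) : Int) % 2 = 1 := by simp only [pvCnt]; omega
  have hk97' : (pvCnt s.toList (k + 97) : Int) % 2 = 1 := by simp only [pvCnt]; omega
  have hST : (∑ j ∈ Finset.range 26,
        ((pvCnt s.toList (j + 71) : Int) + (pvCnt s.toList (j + 97) : Int)) % 2)
      < ∑ j ∈ Finset.range 26,
        ((pvCnt s.toList (j + 71) : Int) % 2 + (pvCnt s.toList (j + 97) : Int) % 2) := by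
    refine Finset.sum_lt_sum (fun j _ => pvTermLe _ _) ⟨k, hk, ?_⟩
    have h1 : (0 : Int) ≤ (pvCnt s.toList (k + 71) : Int) := Int.natCast_nonneg _
    have h2 : (0 : Int) ≤ (pvCnt s.toList (k + 97) : Int) := Int.natCast_nonneg _
    omega
  have hT2 : (2 : Int) ≤ ∑ j ∈ Finset.range 26,
      ((pvCnt s.toList (j + 71) : Int) % 2 + (pvCnt s.toList (j + 97) : Int) % 2) := by
    have hfk : (2 : Int) ≤ ((pvCnt s.toList (k + 71) : Int) % 2 + (pvCnt s.toList (k + 97) : Int) % 2) := by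
      omega
    refine le_trans hfk (Finset.single_le_sum (f := fun j =>
      ((pvCnt s.toList (j + 71) : Int) % 2 + (pvCnt s.toList (j + 97) : Int) % 2))
      (fun j _ => add_nonneg (Int.emod_nonneg _ (by norm_num)) (Int.emod_nonneg _ (by norm_num))) hk)
  have hS0 : (0 : Int) ≤ ∑ j ∈ Finset.range 26,
      ((pvCnt s.toList (j + 71) : Int) + (pvCnt s.toList (j + 97) : Int)) % 2 := by
    exact Finset.sum_nonneg (fun j _ => Int.emod_nonneg _ (by norm_num))
  split_ifs <;> omega
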